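-- pv_equiv track=rewrite | github.com/milez0/WWU-Projects | foobar/re_id.py | answer
-- ===== SOURCE A (Python) =====
-- def answer(n) :
--     primes =  [2]
--     length = 1
--     j = 3
--     delete = False
--     while(length < n+5) :
--         primes.insert(0,j)
--         for p in primes[1:] :
--             if (j % p == 0) :
--                 delete = True
--                 break
--         if (delete) :
--             del primes[0]
--             delete = False
--         else :
--             length+=len(str(j))
--         j+=1
--     lenadj = length - n
--     ret = ""
--     i = 0
--     while (len(ret) < lenadj) :
--         ret = str(primes[i]) + ret
--         i+=1
--     return ret[len(ret) - lenadj:len(ret) - lenadj + 5]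
-- ===== SOURCE B (Python) =====
-- def _is_prime_odd(j):
--     d = 3
--     while d * d <= j:
--         if j % d == 0:
--             return False
--         d += 2
--     return True
--
--
-- def answer(n):
--     s = "2"
--     j = 3
--     while len(s) < n + 5:
--         if _is_prime_odd(j):
--             s += str(j)
--         j += 2
--     return s[n:n + 5]
-- ===== Notes on version B (the rewrite author's own statement) =====
-- stated objective: faster
-- what changed: B tests each odd candidate by trial division only up to sqrt(j) (instead of dividing by every previously found prime) and appends the digits to one growing string returned directly as s[n:n+5], eliminating A's reversed prime list and its second suffix-rebuilding loop.
import Mathlib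
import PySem

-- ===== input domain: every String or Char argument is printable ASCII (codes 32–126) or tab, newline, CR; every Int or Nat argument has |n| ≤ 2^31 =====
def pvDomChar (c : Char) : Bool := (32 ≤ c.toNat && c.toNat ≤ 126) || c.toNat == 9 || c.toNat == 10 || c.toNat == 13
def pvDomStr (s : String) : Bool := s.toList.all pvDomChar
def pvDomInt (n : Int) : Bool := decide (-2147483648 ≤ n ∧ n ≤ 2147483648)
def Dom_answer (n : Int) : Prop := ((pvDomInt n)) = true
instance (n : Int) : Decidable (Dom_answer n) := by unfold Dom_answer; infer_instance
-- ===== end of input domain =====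

-- B replaces A's O(π(P)²) divide-by-every-smaller-prime test and suffix-rebuilding second loop by
-- trial division of odd candidates up to √j appended to one growing string sliced as s[n:n+5];
-- measurably faster. Equivalence is proved for all n ≥ 0 (A raises IndexError for every n < 0,
-- hence Pre_).

-- ===== PORT A =====
-- the while-loop building `primes` (decreasing) and `length`; fuel only bounds the iteration count,
-- the loop exits by its own `length < n+5` test exactly as the Python does
def answerLoopA : Nat → List Int → Int → Int → Int → List Int × Int
  | 0, primes, length, _, _ => (primes, length)
  | fuel+1, primes, length, j, n =>
    if length < n + 5 then
      -- primes.insert(0, j)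
      let primes' := j :: primes
      -- for p in primes[1:]: if j % p == 0: delete = True; break
      if (PySem.List.slice primes' (some 1) none).any (fun p => PySem.Int.mod j p == 0) then
        -- del primes[0]
        answerLoopA fuel (primes'.drop 1) length (j+1) n
      else
        answerLoopA fuel primes' (length + ((PySem.Int.toChars j).length : Int)) (j+1) n
    else (primes, length)

-- the second while-loop: ret = str(primes[i]) + ret; on an out-of-range primes[i] Python raises
-- IndexError (only reachable for n < 0, outside Pre_), the port stops there
def answerRetA : Nat → List Int → List Char → Int → Int → List Char × Int
  | 0, _, ret, i, _ => (ret, i)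
  | fuel+1, primes, ret, i, lenadj =>
    if (ret.length : Int) < lenadj then
      match PySem.List.pyGet? primes i with
      | none => (ret, i)
      | some p => answerRetA fuel primes (PySem.Int.toChars p ++ ret) (i+1) lenadj
    else (ret, i)

def answer (n : Int) : String :=
  let st := answerLoopA (2 ^ (n.toNat + 9)) [2] 1 3 n
  let lenadj := st.2 - n
  let rp := answerRetA (st.1.length + 1) st.1 [] 0 lenadj
  let ret := rp.1
  String.mk (PySem.List.slice ret (some ((ret.length : Int) - lenadj))
                                  (some ((ret.length : Int) - lenadj + 5)))

-- ===== PORT B =====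
-- while d*d <= j: if j % d == 0: return False; d += 2
def isPrimeOddLoop : Nat → Int → Int → Bool
  | 0, _, _ => true
  | fuel+1, j, d =>
    if d * d ≤ j then
      if PySem.Int.mod j d == 0 then false
      else isPrimeOddLoop fuel j (d+2)
    else true

def isPrimeOdd (j : Int) : Bool := isPrimeOddLoop (j.toNat + 1) j 3

-- while len(s) < n+5: if _is_prime_odd(j): s += str(j); j += 2
def answerLoopB : Nat → List Char → Int → Int → List Char
  | 0, s, _, _ => s
  | fuel+1, s, j, n =>
    if (s.length : Int) < n + 5 then
      answerLoopB fuel (if isPrimeOdd j then s ++ PySem.Int.toChars j else s) (j+2) n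
    else s

def answer_alt (n : Int) : String :=
  let s := answerLoopB (2 ^ (n.toNat + 9)) ['2'] 3 n
  String.mk (PySem.List.slice s (some n) (some (n + 5)))

-- ===== PRECONDITION & SPEC =====
-- A raises IndexError for every n < 0 (its second loop runs past the primes list), so Pre_ is 0 ≤ n.
def Pre_answer (n : Int) : Prop := 0 ≤ n
instance (n : Int) : Decidable (Pre_answer n) := by unfold Pre_answer; infer_instance
def pvWitness_answer : Int := (7)

def Spec_answer (n : Int) (out : String) : Prop := out = answer_alt n
instance (n : Int) (out : String) : Decidable (Spec_answer n out) := by unfold Spec_answer; infer_instance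

-- ===== CLAIM (what is proved, stated in full; the proofs are below) =====
def Claim_equal_answer : Prop := ∀ (n : Int), Dom_answer n → Pre_answer n → Spec_answer n (answer n)

-- ===== LEMMAS AND PROOFS =====

-- reference objects: the primes below j, their concatenated decimal digits
def dgs (p : Nat) : List Char := PySem.Int.toChars (p : Int)
def plist (j : Nat) : List Nat := (List.range j).filter (fun p => decide (Nat.Prime p))
def catP (j : Nat) : List Char := (plist j).flatMap dgs
def revP (j : Nat) : List Int := ((plist j).map (fun p => (p : Int))).reverse

theorem plist_succ (j : Nat) :
    plist (j+1) = plist j ++ (if Nat.Prime j then [j] else []) := by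
  unfold plist
  rw [List.range_succ, List.filter_append]
  by_cases h : Nat.Prime j <;> simp [h]

theorem catP_succ (j : Nat) :
    catP (j+1) = catP j ++ (if Nat.Prime j then dgs j else []) := by
  unfold catP
  rw [plist_succ, List.flatMap_append]
  split <;> simp

theorem mem_plist {j p : Nat} : p ∈ plist j ↔ p < j ∧ p.Prime := by
  unfold plist; simp

theorem mem_revP {j : Nat} {q : Int} : q ∈ revP j ↔ ∃ p ∈ plist j, q = (p : Int) := by
  simp [revP]

theorem toDigitsCore_len (b f n : Nat) (acc : List Char) :
    acc.length ≤ (Nat.toDigitsCore b f n acc).length := by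
  induction f generalizing n acc with
  | zero => simp [Nat.toDigitsCore]
  | succ f ih =>
    simp only [Nat.toDigitsCore]
    split
    · simp
    · exact le_trans (by simp) (ih _ _)

theorem toChars_ne_nil (m : Int) : PySem.Int.toChars m ≠ [] := by
  unfold PySem.Int.toChars
  split
  · simp
  · unfold Nat.toDigits
    intro hc
    have h : 1 ≤ (Nat.toDigitsCore 10 (m.toNat + 1) m.toNat []).length := by
      simp only [Nat.toDigitsCore]
      split
      · simp
      · exact le_trans (by simp) (toDigitsCore_len _ _ _ _)
    rw [hc] at h
    simp at h

theorem dgs_ne_nil (p : Nat) : dgs p ≠ [] := toChars_ne_nil _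

theorem catP_prefix {j j' : Nat} (h : j ≤ j') : ∃ t, catP j' = catP j ++ t := by
  induction j' with
  | zero => exact ⟨[], by have hj : j = 0 := by omega
                          simp [hj]⟩
  | succ j' ih =>
    rcases Nat.lt_or_ge j j'.succ with hlt | hge
    · obtain ⟨t, ht⟩ := ih (by omega)
      refine ⟨t ++ (if Nat.Prime j' then dgs j' else []), ?_⟩
      rw [catP_succ, ht, List.append_assoc]
    · have : j = j' + 1 := le_antisymm h hge
      exact ⟨[], by simp [this]⟩

theorem catLen_mono {j j' : Nat} (h : j ≤ j') : (catP j).length ≤ (catP j').length := by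
  obtain ⟨t, ht⟩ := catP_prefix h
  simp [ht]

theorem catLen_lt_of_prime {j j' p : Nat} (hp : p.Prime) (h1 : j ≤ p) (h2 : p < j') :
    (catP j).length < (catP j').length := by
  have hs : (catP p).length < (catP (p+1)).length := by
    rw [catP_succ, if_pos hp]
    have := dgs_ne_nil p
    simp only [List.length_append]
    have : 0 < (dgs p).length := List.length_pos_of_ne_nil this
    omega
  exact lt_of_le_of_lt (catLen_mono h1) (lt_of_lt_of_le hs (catLen_mono (by omega)))

-- π(2^k + 1) ≥ k via Bertrand
theorem catLen_pow (k : Nat) (hk : 1 ≤ k) : k ≤ (catP (2^k + 1)).length := by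
  induction k with
  | zero => omega
  | succ k ih =>
    rcases Nat.eq_or_lt_of_le hk with h1 | h1
    · have hk0 : k = 0 := by omega
      subst hk0
      decide
    · have hk' : 1 ≤ k := by omega
      obtain ⟨p, hp, hlt, hle⟩ := Nat.exists_prime_lt_and_le_two_mul (2^k) (by positivity)
      have := catLen_lt_of_prime hp (j := 2^k + 1) (j' := 2^(k+1) + 1) (by omega) (by rw [pow_succ]; omega)
      have := ih hk'
      omega

-- A's primality test: some smaller prime divides j iff j is composite (j ≥ 2)
theorem composite_iff_exists (j : Nat) (hj : 2 ≤ j) :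
    (∃ p, p.Prime ∧ p < j ∧ p ∣ j) ↔ ¬ j.Prime := by
  constructor
  · rintro ⟨p, hp, hlt, hdvd⟩ hprime
    rcases (Nat.Prime.eq_one_or_self_of_dvd hprime p hdvd) with h | h
    · have := hp.two_le; omega
    · omega
  · intro hnp
    refine ⟨j.minFac, Nat.minFac_prime (by omega), ?_, Nat.minFac_dvd j⟩
    have hsq := Nat.minFac_sq_le_self (by omega) hnp
    have h2 := (Nat.minFac_prime (show j ≠ 1 by omega)).two_le
    nlinarith [hsq, h2]

theorem anyDiv_eq (j : Nat) (hj : 2 ≤ j) :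
    ((revP j).any (fun p => PySem.Int.mod (j : Int) p == 0)) = !(decide j.Prime) := by
  have key : ((revP j).any (fun p => PySem.Int.mod (j : Int) p == 0)) = true ↔ ¬ j.Prime := by
    rw [List.any_eq_true]
    constructor
    · rintro ⟨pi, hmem, hdv⟩
      obtain ⟨p, hp, rfl⟩ := mem_revP.mp hmem
      rw [beq_iff_eq, PySem.Int.mod_eq_zero_iff_dvd, Int.natCast_dvd_natCast] at hdv
      obtain ⟨hlt, hpp⟩ := mem_plist.mp hp
      exact (composite_iff_exists j hj).mp ⟨p, hpp, hlt, hdv⟩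
    · intro hnp
      obtain ⟨p, hpp, hlt, hdvd⟩ := (composite_iff_exists j hj).mpr hnp
      refine ⟨(p : Int), mem_revP.mpr ⟨p, mem_plist.mpr ⟨hlt, hpp⟩, rfl⟩, ?_⟩
      simpa [beq_iff_eq, PySem.Int.mod_eq_zero_iff_dvd] using Int.natCast_dvd_natCast.mpr hdvd
  by_cases hp : j.Prime
  · simp only [hp, decide_true, Bool.not_true]
    exact Bool.eq_false_iff.mpr (fun h => (key.mp h) hp)
  · simp only [hp, decide_false, Bool.not_false]
    exact key.mpr hp

-- B's primality test
theorem isPrimeOddLoop_spec (fuel : Nat) (j d : Int) (hd : 3 ≤ d) (hj : 3 ≤ j)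
    (hfuel : j < d + 2 * fuel) :
    isPrimeOddLoop fuel j d = true ↔ ∀ k : Nat, (d + 2*k) * (d + 2*k) ≤ j → ¬ (d + 2*k) ∣ j := by
  induction fuel generalizing d with
  | zero =>
    simp only [isPrimeOddLoop, true_iff]
    intro k hk
    have h0 : (0:Int) ≤ (k:Int) := Int.natCast_nonneg k
    push_cast at hfuel
    nlinarith [hk, h0, hd]
  | succ fuel ih =>
    rw [isPrimeOddLoop]
    by_cases hdd : d * d ≤ j
    · rw [if_pos hdd]
      by_cases hdvd : d ∣ j
      · have hc : (PySem.Int.mod j d == 0) = true := by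
          simp [PySem.Int.mod_eq_zero_iff_dvd, hdvd]
        rw [hc, if_pos rfl]
        simp only [Bool.false_eq_true, false_iff]
        push_neg
        exact ⟨0, by simpa using hdd, by simpa using hdvd⟩
      · have hc : (PySem.Int.mod j d == 0) = false := by
          simp [PySem.Int.mod_eq_zero_iff_dvd, hdvd]
        rw [hc, if_neg (by simp)]
        rw [ih (d+2) (by omega) (by push_cast at hfuel ⊢; omega)]
        constructor
        · intro h k hk
          rcases k with _ | k
          · simpa using hdvd
          · have hh := h k (by push_cast at hk ⊢; nlinarith)
            push_cast
            have he : d + 2 * ((k:Int) + 1) = d + 2 + 2 * (k:Int) := by ring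
            rw [he]
            exact_mod_cast hh
        · intro h k hk
          have hh := h (k+1) (by push_cast at hk ⊢; nlinarith)
          push_cast at hh
          have he : d + 2 * ((k:Int) + 1) = d + 2 + 2 * (k:Int) := by ring
          rw [he] at hh
          exact_mod_cast hh
    · rw [if_neg hdd]
      simp only [true_iff]
      intro k hk
      push_neg at hdd
      have h0 : (0:Int) ≤ (k:Int) := Int.natCast_nonneg k
      nlinarith [hk, h0, hd]

theorem isPrimeOdd_eq (j : Nat) (hj : 3 ≤ j) (hodd : j % 2 = 1) :
    isPrimeOdd (j : Int) = decide j.Prime := by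
  have hspec := isPrimeOddLoop_spec (j + 1) (j : Int) 3 (by omega) (by exact_mod_cast hj)
      (by push_cast; omega)
  rw [isPrimeOdd, Int.toNat_natCast]
  by_cases hp : j.Prime
  · simp only [hp, decide_true]
    rw [hspec]
    intro k hk hdvd
    have hdv' : (3 + 2*k) ∣ j := by exact_mod_cast hdvd
    rcases Nat.Prime.eq_one_or_self_of_dvd hp _ hdv' with h | h
    · omega
    · have hk' : (3 + 2*k) * (3 + 2*k) ≤ j := by exact_mod_cast hk
      nlinarith [hk']
  · simp only [hp, decide_false]
    rw [← Bool.not_eq_true, hspec]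
    intro hall
    set m := j.minFac with hm
    have hmp : m.Prime := Nat.minFac_prime (by omega)
    have hmd : m ∣ j := Nat.minFac_dvd j
    have hsq : m * m ≤ j := by
      have := Nat.minFac_sq_le_self (n := j) (by omega) hp
      nlinarith [this]
    have hm2 : m ≠ 2 := by
      intro h2
      have : 2 ∣ j := h2 ▸ hmd
      omega
    have hmodd : m % 2 = 1 := Nat.odd_iff.mp (hmp.odd_of_ne_two hm2)
    have hm3 : 3 ≤ m := by
      have := hmp.two_le
      omega
    have hcast : (3 : Int) + 2 * (((m - 3) / 2 : Nat) : Int) = (m : Int) := by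
      push_cast
      omega
    exact hall ((m - 3) / 2) (by rw [hcast]; exact_mod_cast hsq)
      (by rw [hcast]; exact Int.natCast_dvd_natCast.mpr hmd)

theorem not_prime_even_succ (j : Nat) (hj : 3 ≤ j) (hodd : j % 2 = 1) : ¬ (j+1).Prime := by
  intro hp
  have h2 : 2 ∣ (j+1) := by omega
  rcases Nat.Prime.eq_one_or_self_of_dvd hp 2 h2 with h | h <;> omega

theorem revP_succ_prime {j : Nat} (hp : j.Prime) : revP (j+1) = (j : Int) :: revP j := by
  unfold revP
  rw [plist_succ, if_pos hp]
  simp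

theorem revP_succ_comp {j : Nat} (hp : ¬ j.Prime) : revP (j+1) = revP j := by
  unfold revP
  rw [plist_succ, if_neg hp]
  simp

-- fuel sufficiency: 2^(N+9) steps from 3 pass a point where the length reaches N+5
theorem stop_exists (N : Nat) : N + 5 ≤ (catP (3 + 2 ^ (N + 9))).length := by
  have h1 := catLen_pow (N + 9) (by omega)
  have h2 : (catP (2 ^ (N+9) + 1)).length ≤ (catP (3 + 2 ^ (N + 9))).length :=
    catLen_mono (by omega)
  omega

theorem hexA (N : Nat) : ∃ m, N + 5 ≤ (catP (3 + m)).length := ⟨2 ^ (N + 9), stop_exists N⟩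

theorem hexB (N : Nat) : ∃ m, N + 5 ≤ (catP (3 + 2 * m)).length :=
  ⟨2 ^ (N + 9), le_trans (stop_exists N) (catLen_mono (by omega))⟩

def Ewit (N : Nat) : Nat := 3 + Nat.find (hexA N)
def EwitB (N : Nat) : Nat := 3 + 2 * Nat.find (hexB N)

theorem Ewit_ge (N : Nat) : 3 ≤ Ewit N := by unfold Ewit; omega
theorem Ewit_stop (N : Nat) : N + 5 ≤ (catP (Ewit N)).length := Nat.find_spec (hexA N)
theorem Ewit_min {N i : Nat} (h3 : 3 ≤ i) (hi : i < Ewit N) : (catP i).length < N + 5 := by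
  have := Nat.find_min (hexA N) (m := i - 3) (by unfold Ewit at hi; omega)
  have he : 3 + (i - 3) = i := by omega
  rw [he] at this
  omega
theorem EwitB_ge (N : Nat) : 3 ≤ EwitB N := by unfold EwitB; omega
theorem EwitB_odd (N : Nat) : EwitB N % 2 = 1 := by unfold EwitB; omega
theorem EwitB_stop (N : Nat) : N + 5 ≤ (catP (EwitB N)).length := Nat.find_spec (hexB N)
theorem EwitB_min {N i : Nat} (h3 : 3 ≤ i) (hodd : i % 2 = 1) (hi : i < EwitB N) :
    (catP i).length < N + 5 := by
  have := Nat.find_min (hexB N) (m := (i - 3) / 2) (by unfold EwitB at hi; omega)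
  have he : 3 + 2 * ((i - 3) / 2) = i := by omega
  rw [he] at this
  omega
theorem Ewit_le_EwitB (N : Nat) : Ewit N ≤ EwitB N := by
  by_contra hc
  have h1 := EwitB_stop N
  have h2 := Ewit_min (N := N) (EwitB_ge N) (by omega)
  omega

-- A's while loop computes the primes below `Ewit N` and the total length
theorem loopA_eq (n : Int) (N : Nat) (hn : n = (N : Int)) :
    ∀ (fuel : Nat) (j : Nat), 3 ≤ j → j ≤ Ewit N → N + 5 ≤ (catP (j + fuel)).length →
    answerLoopA fuel (revP j) ((catP j).length : Int) (j : Int) n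
      = (revP (Ewit N), ((catP (Ewit N)).length : Int)) := by
  intro fuel
  induction fuel with
  | zero =>
    intro j h3 hle hstop
    have hj : j = Ewit N := by
      by_contra hne
      have := Ewit_min (N := N) h3 (by omega)
      simp only [Nat.add_zero] at hstop
      omega
    subst hj
    rfl
  | succ fuel ih =>
    intro j h3 hle hstop
    by_cases hstopj : N + 5 ≤ (catP j).length
    · have hj : j = Ewit N := by
        by_contra hne
        have := Ewit_min (N := N) h3 (by omega)
        omega
      subst hj
      rw [answerLoopA, if_neg (by push_cast [hn]; omega)]
    · have hjlt : j < Ewit N := by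
        rcases Nat.lt_or_ge j (Ewit N) with h | h
        · exact h
        · have : j = Ewit N := by omega
          exact absurd (this ▸ Ewit_stop N) hstopj
      rw [answerLoopA, if_pos (by push_cast [hn]; omega)]
      simp only [PySem.List.slice_from_one, List.tail_cons]
      rw [anyDiv_eq j (by omega)]
      by_cases hp : j.Prime
      · rw [if_neg (by simp [hp])]
        have h1 : (j : Int) :: revP j = revP (j+1) := (revP_succ_prime hp).symm
        have h2 : ((catP j).length : Int) + ((PySem.Int.toChars (j : Int)).length : Int)
            = ((catP (j+1)).length : Int) := by
          rw [catP_succ, if_pos hp]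
          push_cast [dgs]
          simp
        have h3' : (j : Int) + 1 = ((j + 1 : Nat) : Int) := by push_cast; ring
        rw [h1, h2, h3']
        exact ih (j+1) (by omega) (by omega) (by
          have he : j + 1 + fuel = j + (fuel + 1) := by omega
          rw [he]; exact hstop)
      · rw [if_pos (by simp [hp])]
        simp only [List.drop_succ_cons, List.drop_zero]
        have h1 : revP j = revP (j+1) := (revP_succ_comp hp).symm
        have h2 : ((catP j).length : Int) = ((catP (j+1)).length : Int) := by
          rw [catP_succ, if_neg hp]; simp
        have h3' : (j : Int) + 1 = ((j + 1 : Nat) : Int) := by push_cast; ring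
        rw [h1, h2, h3']
        exact ih (j+1) (by omega) (by omega) (by
          have he : j + 1 + fuel = j + (fuel + 1) := by omega
          rw [he]; exact hstop)

-- B's while loop computes the concatenated digit string up to `EwitB N`
theorem loopB_eq (n : Int) (N : Nat) (hn : n = (N : Int)) :
    ∀ (fuel : Nat) (j : Nat), 3 ≤ j → j % 2 = 1 → j ≤ EwitB N →
    N + 5 ≤ (catP (j + 2 * fuel)).length →
    answerLoopB fuel (catP j) (j : Int) n = catP (EwitB N) := by
  intro fuel
  induction fuel with
  | zero =>
    intro j h3 hodd hle hstop
    have hj : j = EwitB N := by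
      by_contra hne
      have := EwitB_min (N := N) h3 hodd (by omega)
      simp only [Nat.mul_zero, Nat.add_zero] at hstop
      omega
    subst hj
    rfl
  | succ fuel ih =>
    intro j h3 hodd hle hstop
    by_cases hstopj : N + 5 ≤ (catP j).length
    · have hj : j = EwitB N := by
        by_contra hne
        have := EwitB_min (N := N) h3 hodd (by omega)
        omega
      subst hj
      rw [answerLoopB, if_neg (by push_cast [hn]; omega)]
    · have hjlt : j < EwitB N := by
        rcases Nat.lt_or_ge j (EwitB N) with h | h
        · exact h
        · have : j = EwitB N := by omega
          exact absurd (this ▸ EwitB_stop N) hstopj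
      have hj2 : j + 2 ≤ EwitB N := by
        have := EwitB_odd N
        omega
      rw [answerLoopB, if_pos (by push_cast [hn]; omega)]
      rw [isPrimeOdd_eq j h3 hodd]
      have hcat2 : catP (j+2) = catP j ++ (if j.Prime then dgs j else []) := by
        have e1 : j + 2 = (j + 1) + 1 := by omega
        rw [e1, catP_succ, catP_succ, if_neg (not_prime_even_succ j h3 hodd)]
        simp
      have hbranch : (if decide j.Prime = true then catP j ++ PySem.Int.toChars (j : Int)
          else catP j) = catP (j+2) := by
        rw [hcat2]
        by_cases hp : j.Prime <;> simp [hp, dgs]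
      have h3' : (j : Int) + 2 = ((j + 2 : Nat) : Int) := by push_cast; ring
      rw [hbranch, h3']
      exact ih (j+2) (by omega) (by omega) hj2 (by
        have he : j + 2 + 2 * fuel = j + 2 * (fuel + 1) := by omega
        rw [he]; exact hstop)

-- the suffix of the digit string rebuilt by A's second loop
def sfx (N i : Nat) : List Char :=
  ((plist (Ewit N)).drop ((plist (Ewit N)).length - i)).flatMap dgs

theorem sfx_zero (N : Nat) : sfx N 0 = [] := by
  unfold sfx
  simp

theorem sfx_full (N : Nat) : sfx N (plist (Ewit N)).length = catP (Ewit N) := by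
  unfold sfx catP
  simp

theorem sfx_suffix (N i : Nat) : ∃ pre, catP (Ewit N) = pre ++ sfx N i ∧
    pre.length + (sfx N i).length = (catP (Ewit N)).length := by
  refine ⟨((plist (Ewit N)).take ((plist (Ewit N)).length - i)).flatMap dgs, ?_, ?_⟩
  · unfold sfx catP
    rw [← List.flatMap_append, List.take_append_drop]
  · have : (catP (Ewit N)) = ((plist (Ewit N)).take ((plist (Ewit N)).length - i)).flatMap dgs
        ++ sfx N i := by
      unfold sfx catP
      rw [← List.flatMap_append, List.take_append_drop]
    rw [this]
    simp

theorem sfx_succ {N i : Nat} (hi : i < (plist (Ewit N)).length) :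
    sfx N (i+1) = dgs ((plist (Ewit N))[(plist (Ewit N)).length - 1 - i]) ++ sfx N i := by
  unfold sfx
  have e1 : (plist (Ewit N)).length - (i+1) = (plist (Ewit N)).length - 1 - i := by omega
  rw [e1, List.drop_eq_getElem_cons (by omega)]
  have e2 : (plist (Ewit N)).length - 1 - i + 1 = (plist (Ewit N)).length - i := by omega
  rw [List.flatMap_cons, e2]

theorem revP_get {N i : Nat} (hi : i < (plist (Ewit N)).length) :
    PySem.List.pyGet? (revP (Ewit N)) (i : Int)
      = some (((plist (Ewit N))[(plist (Ewit N)).length - 1 - i] : Nat) : Int) := by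
  rw [PySem.List.pyGet?_natCast]
  unfold revP
  rw [List.getElem?_reverse (by simpa using hi)]
  rw [List.getElem?_map, List.getElem?_eq_getElem (by simp; omega)]
  simp [← List.map_eq_flatMap]

-- A's second loop: result is a suffix of the digit string of length ≥ lenadj
theorem loopRet_spec (n : Int) (N : Nat) (hn : n = (N : Int)) :
    ∀ (fuel i : Nat), i ≤ (plist (Ewit N)).length → (plist (Ewit N)).length - i < fuel →
    ∃ i', i ≤ i' ∧ i' ≤ (plist (Ewit N)).length ∧
      (catP (Ewit N)).length - N ≤ (sfx N i').length ∧
      (answerRetA fuel (revP (Ewit N)) (sfx N i) (i : Int)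
          (((catP (Ewit N)).length : Int) - n)).1 = sfx N i' := by
  intro fuel
  induction fuel with
  | zero => intro i hi hf; omega
  | succ fuel ih =>
    intro i hi hf
    by_cases hlen : (catP (Ewit N)).length - N ≤ (sfx N i).length
    · refine ⟨i, le_refl i, hi, hlen, ?_⟩
      rw [answerRetA, if_neg (by
        push_cast [hn]
        have h5 := Ewit_stop N
        omega)]
    · have hlt : i < (plist (Ewit N)).length := by
        rcases Nat.lt_or_ge i (plist (Ewit N)).length with h | h
        · exact h
        · have hieq : i = (plist (Ewit N)).length := by omega
          rw [hieq, sfx_full] at hlen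
          exact absurd (by omega) hlen
      rw [answerRetA, if_pos (by
        push_cast [hn]
        have h5 := Ewit_stop N
        omega), revP_get hlt]
      have harg : PySem.Int.toChars (((plist (Ewit N))[(plist (Ewit N)).length - 1 - i] : Nat) : Int)
          ++ sfx N i = sfx N (i+1) := by
        rw [sfx_succ hlt]
        rfl
      have hcast : (i : Int) + 1 = ((i + 1 : Nat) : Int) := by push_cast; ring
      simp only [harg, hcast]
      obtain ⟨i', h1, h2, h3, h4⟩ := ih (i+1) (by omega) (by omega)
      exact ⟨i', by omega, h2, h3, h4⟩

theorem take_drop_eq_of_prefix {l l' : List Char} {N : Nat}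
    (hpre : ∃ t, l' = l ++ t) (hlen : N + 5 ≤ l.length) :
    (l.drop N).take 5 = (l'.drop N).take 5 := by
  obtain ⟨t, rfl⟩ := hpre
  rw [List.drop_append_of_le_length (by omega),
      List.take_append_of_le_length (by simp; omega)]

-- ===== VERDICT (by name: the statement is the Claim_ definition above) =====
set_option maxHeartbeats 1000000 in
theorem answer_spec : Claim_equal_answer := by
  unfold Claim_equal_answer Spec_answer Pre_answer
  intro n _ hpre
  set N := n.toNat with hN
  have hn : n = (N : Int) := by omega
  -- evaluate A
  have hA0 : answerLoopA (2 ^ (n.toNat + 9)) [2] 1 3 n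
      = (revP (Ewit N), ((catP (Ewit N)).length : Int)) := by
    have h32 : revP 3 = [2] := by decide
    have h31 : ((catP 3).length : Int) = 1 := by decide
    have h33 : ((3 : Nat) : Int) = 3 := by norm_num
    rw [← h32, ← h31, ← h33, ← hN]
    exact loopA_eq n N hn _ 3 (by omega) (Ewit_ge N) (stop_exists N)
  have hB0 : answerLoopB (2 ^ (n.toNat + 9)) ['2'] 3 n = catP (EwitB N) := by
    have h32 : catP 3 = ['2'] := by decide
    have h33 : ((3 : Nat) : Int) = 3 := by norm_num
    rw [← h32, ← h33, ← hN]
    exact loopB_eq n N hn _ 3 (by omega) (by omega) (EwitB_ge N)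
      (le_trans (stop_exists N) (catLen_mono (by omega)))
  have hL5 := Ewit_stop N
  have hlenrev : (revP (Ewit N)).length = (plist (Ewit N)).length := by simp [revP]
  obtain ⟨i', hi1, hi2, hi3, hret⟩ :=
    loopRet_spec n N hn ((plist (Ewit N)).length + 1) 0 (by omega) (by omega)
  simp only [Nat.cast_zero, sfx_zero] at hret
  unfold answer answer_alt
  simp only [hA0, hB0]
  rw [hlenrev, hret]
  obtain ⟨pre, hcat, hlensum⟩ := sfx_suffix N i'
  have hrL : (sfx N i').length ≤ (catP (Ewit N)).length := by omega
  have hidx : (((sfx N i').length : Int) - (((catP (Ewit N)).length : Int) - n))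
      = (((sfx N i').length - ((catP (Ewit N)).length - N) : Nat) : Int) := by
    rw [hn]
    push_cast
    omega
  rw [hidx]
  have h5 : (((sfx N i').length - ((catP (Ewit N)).length - N) : Nat) : Int) + 5
      = (((sfx N i').length - ((catP (Ewit N)).length - N) : Nat) : Int) + ((5 : Nat) : Int) := by
    norm_num
  rw [h5, PySem.List.slice_natCast_add]
  have h5' : (n + 5) = ((N : Int) + ((5 : Nat) : Int)) := by rw [hn]; norm_num
  rw [h5', hn, PySem.List.slice_natCast_add]
  have hpre : pre.length ≤ N := by omega
  have hidx2 : N - pre.length = (sfx N i').length - ((catP (Ewit N)).length - N) := by omega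
  have hdrop : (catP (Ewit N)).drop N = (sfx N i').drop (N - pre.length) := by
    rw [hcat, List.drop_append, List.drop_eq_nil_of_le hpre, List.nil_append]
  rw [← hidx2, ← hdrop]
  exact congrArg String.mk (take_drop_eq_of_prefix (catP_prefix (Ewit_le_EwitB N)) hL5)
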